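-- pv_equiv track=rewrite | github.com/lovegold120221-dot/Vision-Agents | plugins/xai/example/xai_conference_companion_example.py | _resolve_handle
-- ===== SOURCE A (Python) =====
-- from typing import Any, Awaitable, Callable, Optional
--
-- ATTENDEES: dict[str, dict[str, Any]] = {
--     "tschellenbach": {
--         "name": "Thierry Schellenbach",
--         "aliases": ["thierry"],
--         "role": "Founder & CEO",
--         "company": "Stream",
--         "interests": ["chat infrastructure", "video APIs", "developer tools"],
--         "last_met": "AI Engineer Summit — talked real-time video infra",
--     },
--     "d3xvn": {
--         "name": "Deven",
--         "aliases": ["deven", "devon"],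
--         "role": "Engineer",
--         "company": "Stream",
--         "interests": ["WebRTC", "audio pipelines", "edge networking"],
--         "last_met": "Office co-working day — debugged a WebRTC race",
--     },
--     "neevash": {
--         "name": "Neevash Ramdial",
--         "aliases": ["nash", "neevash"],
--         "role": "AI Engineer",
--         "company": "Stream",
--         "interests": ["reinforcement learning", "robotics", "model evaluation"],
--         "last_met": "January office visit — discussed hiring",
--     },
-- }
--
-- def _resolve_handle(query: str) -> Optional[str]:
--     """Match a free-form query (name, alias, or handle) to a canonical handle."""
--     q = query.lower().strip().lstrip("@")
--     if q in ATTENDEES: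
--         return q
--     for handle, record in ATTENDEES.items():
--         if q == record["name"].lower():
--             return handle
--         if any(q == alias.lower() for alias in record["aliases"]):
--             return handle
--     for handle, record in ATTENDEES.items():
--         if q in record["name"].lower():
--             return handle
--     return None
-- ===== SOURCE B (Python) =====
-- from typing import Any, Optional
--
-- ATTENDEES: dict[str, dict[str, Any]] = {
--     "tschellenbach": {
--         "name": "Thierry Schellenbach",
--         "aliases": ["thierry"],
--         "role": "Founder & CEO",
--         "company": "Stream",
--         "interests": ["chat infrastructure", "video APIs", "developer tools"],
--         "last_met": "AI Engineer Summit — talked real-time video infra",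
--     },
--     "d3xvn": {
--         "name": "Deven",
--         "aliases": ["deven", "devon"],
--         "role": "Engineer",
--         "company": "Stream",
--         "interests": ["WebRTC", "audio pipelines", "edge networking"],
--         "last_met": "Office co-working day — debugged a WebRTC race",
--     },
--     "neevash": {
--         "name": "Neevash Ramdial",
--         "aliases": ["nash", "neevash"],
--         "role": "AI Engineer",
--         "company": "Stream",
--         "interests": ["reinforcement learning", "robotics", "model evaluation"],
--         "last_met": "January office visit — discussed hiring",
--     },
-- }
--
-- # One exact-match index built once: canonical handles first (so handle precedence
-- # wins via setdefault), then each record's lowered name and aliases in record order.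
-- INDEX: dict[str, str] = {}
-- for _handle in ATTENDEES:
--     INDEX.setdefault(_handle, _handle)
-- for _handle, _record in ATTENDEES.items():
--     INDEX.setdefault(_record["name"].lower(), _handle)
--     for _alias in _record["aliases"]:
--         INDEX.setdefault(_alias.lower(), _handle)
--
-- # (lowered name, handle) pairs for the substring fallback, precomputed once.
-- NAMES: list[tuple[str, str]] = [
--     (record["name"].lower(), handle) for handle, record in ATTENDEES.items()
-- ]
--
-- def _resolve_handle(query: str) -> Optional[str]:
--     """Match a free-form query (name, alias, or handle) to a canonical handle."""
--     q = query.lower().strip().lstrip("@")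
--     hit = INDEX.get(q)
--     if hit is not None:
--         return hit
--     return next((handle for low, handle in NAMES if q in low), None)
-- ===== Notes on version B (the rewrite author's own statement) =====
-- stated objective: simpler
-- what changed: B precomputes a single exact-match dict INDEX (handle->itself, lowered name->handle, lowered alias->handle, handle precedence via setdefault) so the membership test and the exact name/alias scan collapse into one dict lookup, and precomputes (lowered name, handle) pairs so the substring fallback is a single find-first over that list.
import Mathlib
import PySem

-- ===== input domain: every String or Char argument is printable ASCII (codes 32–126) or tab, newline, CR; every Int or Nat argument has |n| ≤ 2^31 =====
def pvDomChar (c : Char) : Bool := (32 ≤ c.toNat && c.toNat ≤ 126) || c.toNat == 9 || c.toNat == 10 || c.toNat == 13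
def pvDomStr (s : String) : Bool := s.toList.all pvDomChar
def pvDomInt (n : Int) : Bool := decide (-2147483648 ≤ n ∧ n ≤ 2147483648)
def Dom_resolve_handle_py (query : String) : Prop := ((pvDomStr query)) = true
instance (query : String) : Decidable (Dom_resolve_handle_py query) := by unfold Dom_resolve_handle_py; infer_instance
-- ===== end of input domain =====

-- B replaces A's membership test plus exact name/alias scan by one lookup in a dict
-- index built once (objective: simpler); equivalence proved for all queries.

-- ===== PORT A =====
-- ATTENDEES, restricted to the fields _resolve_handle reads: (handle, name, aliases)
def pvAttendeesA : List (String × String × List String) :=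
  [("tschellenbach", "Thierry Schellenbach", ["thierry"]),
   ("d3xvn", "Deven", ["deven", "devon"]),
   ("neevash", "Neevash Ramdial", ["nash", "neevash"])]

-- q = query.lower().strip().lstrip("@");  lstrip("@") = drop leading '@' (exact: the
-- stripped char set is the single char '@')
def pvNormA (query : String) : List Char :=
  List.dropWhile (· == '@') (PySem.Chars.strip (PySem.Str.lower query).toList)

-- the exact-match loop: q == record["name"].lower() or any(q == alias.lower() …)
def pvExactLoopA (q : List Char) : List (String × String × List String) → Option String
  | [] => none
  | (handle, name, aliases) :: rest =>
    if q == PySem.Chars.lower name.toList then some handle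
    else if aliases.any (fun a => q == PySem.Chars.lower a.toList) then some handle
    else pvExactLoopA q rest

-- the substring fallback loop: q in record["name"].lower()
def pvSubLoopA (q : List Char) : List (String × String × List String) → Option String
  | [] => none
  | (handle, name, _) :: rest =>
    if PySem.Chars.isIn q (PySem.Chars.lower name.toList) then some handle
    else pvSubLoopA q rest

def resolve_handle_py (query : String) : Option String :=
  let q := pvNormA query
  if pvAttendeesA.any (fun r => q == r.1.toList) then some (String.ofList q)
  else
    match pvExactLoopA q pvAttendeesA with
    | some handle => some handle
    | none => pvSubLoopA q pvAttendeesA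

-- ===== PORT B =====
def pvAttendeesB : List (String × String × List String) :=
  [("tschellenbach", "Thierry Schellenbach", ["thierry"]),
   ("d3xvn", "Deven", ["deven", "devon"]),
   ("neevash", "Neevash Ramdial", ["nash", "neevash"])]

-- INDEX: handles first, then each record's lowered name and aliases, via setdefault
def pvIndexB : PySem.Dict (List Char) String :=
  let d := pvAttendeesB.foldl (fun d r => d.setdefault r.1.toList r.1) PySem.Dict.empty
  pvAttendeesB.foldl
    (fun d r =>
      r.2.2.foldl (fun d a => d.setdefault (PySem.Chars.lower a.toList) r.1)
        (d.setdefault (PySem.Chars.lower r.2.1.toList) r.1))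
    d

-- NAMES: (lowered name, handle) pairs, precomputed once
def pvNamesB : List (List Char × String) :=
  pvAttendeesB.map (fun r => (PySem.Chars.lower r.2.1.toList, r.1))

def pvNormB (query : String) : List Char :=
  List.dropWhile (· == '@') (PySem.Chars.strip (PySem.Str.lower query).toList)

def resolve_handle_py_alt (query : String) : Option String :=
  let q := pvNormB query
  match pvIndexB.get? q with
  | some hit => some hit
  | none => (pvNamesB.find? (fun p => PySem.Chars.isIn q p.1)).map (·.2)

-- ===== PRECONDITION & SPEC =====
def Spec_resolve_handle_py (query : String) (out : Option String) : Prop := out = resolve_handle_py_alt query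
instance (query : String) (out : Option String) : Decidable (Spec_resolve_handle_py query out) := by unfold Spec_resolve_handle_py; infer_instance

-- ===== CLAIM (what is proved, stated in full; the proofs are below) =====
def Claim_equal_resolve_handle_py : Prop := ∀ (query : String), Dom_resolve_handle_py query → Spec_resolve_handle_py query (resolve_handle_py query)

-- ===== LEMMAS AND PROOFS =====

theorem pv_core (q : List Char) :
    (if pvAttendeesA.any (fun r => q == r.1.toList) then some (String.ofList q)
     else
       match pvExactLoopA q pvAttendeesA with
       | some handle => some handle
       | none => pvSubLoopA q pvAttendeesA) =
    (match pvIndexB.get? q with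
     | some hit => some hit
     | none => (pvNamesB.find? (fun p => PySem.Chars.isIn q p.1)).map (·.2)) := by
  by_cases h1 : q = ['t', 's', 'c', 'h', 'e', 'l', 'l', 'e', 'n', 'b', 'a', 'c', 'h']
  · subst h1; decide
  by_cases h2 : q = ['d', '3', 'x', 'v', 'n']
  · subst h2; decide
  by_cases h3 : q = ['n', 'e', 'e', 'v', 'a', 's', 'h']
  · subst h3; decide
  by_cases h4 : q = ['t', 'h', 'i', 'e', 'r', 'r', 'y', ' ', 's', 'c', 'h', 'e', 'l', 'l', 'e', 'n', 'b', 'a', 'c', 'h']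
  · subst h4; decide
  by_cases h5 : q = ['t', 'h', 'i', 'e', 'r', 'r', 'y']
  · subst h5; decide
  by_cases h6 : q = ['d', 'e', 'v', 'e', 'n']
  · subst h6; decide
  by_cases h7 : q = ['d', 'e', 'v', 'o', 'n']
  · subst h7; decide
  by_cases h8 : q = ['n', 'e', 'e', 'v', 'a', 's', 'h', ' ', 'r', 'a', 'm', 'd', 'i', 'a', 'l']
  · subst h8; decide
  by_cases h9 : q = ['n', 'a', 's', 'h']
  · subst h9; decide
  · have e1 : PySem.Chars.lower ['T', 'h', 'i', 'e', 'r', 'r', 'y', ' ', 'S', 'c', 'h', 'e', 'l', 'l', 'e', 'n', 'b', 'a', 'c', 'h'] = ['t', 'h', 'i', 'e', 'r', 'r', 'y', ' ', 's', 'c', 'h', 'e', 'l', 'l', 'e', 'n', 'b', 'a', 'c', 'h'] := by decide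
    have e2 : PySem.Chars.lower ['D', 'e', 'v', 'e', 'n'] = ['d', 'e', 'v', 'e', 'n'] := by decide
    have e3 : PySem.Chars.lower ['N', 'e', 'e', 'v', 'a', 's', 'h', ' ', 'R', 'a', 'm', 'd', 'i', 'a', 'l'] = ['n', 'e', 'e', 'v', 'a', 's', 'h', ' ', 'r', 'a', 'm', 'd', 'i', 'a', 'l'] := by decide
    have e4 : PySem.Chars.lower ['t', 'h', 'i', 'e', 'r', 'r', 'y'] = ['t', 'h', 'i', 'e', 'r', 'r', 'y'] := by decide
    have e5 : PySem.Chars.lower ['d', 'e', 'v', 'e', 'n'] = ['d', 'e', 'v', 'e', 'n'] := by decide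
    have e6 : PySem.Chars.lower ['d', 'e', 'v', 'o', 'n'] = ['d', 'e', 'v', 'o', 'n'] := by decide
    have e7 : PySem.Chars.lower ['n', 'a', 's', 'h'] = ['n', 'a', 's', 'h'] := by decide
    have e8 : PySem.Chars.lower ['n', 'e', 'e', 'v', 'a', 's', 'h'] = ['n', 'e', 'e', 'v', 'a', 's', 'h'] := by decide
    have hidx : pvIndexB = PySem.Dict.mk [(['t', 's', 'c', 'h', 'e', 'l', 'l', 'e', 'n', 'b', 'a', 'c', 'h'], "tschellenbach"), (['d', '3', 'x', 'v', 'n'], "d3xvn"), (['n', 'e', 'e', 'v', 'a', 's', 'h'], "neevash"), (['t', 'h', 'i', 'e', 'r', 'r', 'y', ' ', 's', 'c', 'h', 'e', 'l', 'l', 'e', 'n', 'b', 'a', 'c', 'h'], "tschellenbach"), (['t', 'h', 'i', 'e', 'r', 'r', 'y'], "tschellenbach"), (['d', 'e', 'v', 'e', 'n'], "d3xvn"), (['d', 'e', 'v', 'o', 'n'], "d3xvn"), (['n', 'e', 'e', 'v', 'a', 's', 'h', ' ', 'r', 'a', 'm', 'd', 'i', 'a', 'l'], "neevash"), (['n', 'a',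 's', 'h'], "neevash")] := by decide
    have b1 : (['t', 's', 'c', 'h', 'e', 'l', 'l', 'e', 'n', 'b', 'a', 'c', 'h'] == q) = false := by simp [Ne.symm h1]
    have b2 : (['d', '3', 'x', 'v', 'n'] == q) = false := by simp [Ne.symm h2]
    have b3 : (['n', 'e', 'e', 'v', 'a', 's', 'h'] == q) = false := by simp [Ne.symm h3]
    have b4 : (['t', 'h', 'i', 'e', 'r', 'r', 'y', ' ', 's', 'c', 'h', 'e', 'l', 'l', 'e', 'n', 'b', 'a', 'c', 'h'] == q) = false := by simp [Ne.symm h4]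
    have b5 : (['t', 'h', 'i', 'e', 'r', 'r', 'y'] == q) = false := by simp [Ne.symm h5]
    have b6 : (['d', 'e', 'v', 'e', 'n'] == q) = false := by simp [Ne.symm h6]
    have b7 : (['d', 'e', 'v', 'o', 'n'] == q) = false := by simp [Ne.symm h7]
    have b8 : (['n', 'e', 'e', 'v', 'a', 's', 'h', ' ', 'r', 'a', 'm', 'd', 'i', 'a', 'l'] == q) = false := by simp [Ne.symm h8]
    have b9 : (['n', 'a', 's', 'h'] == q) = false := by simp [Ne.symm h9]
    simp [pvAttendeesA, pvAttendeesB, pvExactLoopA, pvSubLoopA, pvNamesB,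
      e1, e2, e3, e4, e5, e6, e7, e8, hidx, PySem.Dict.get?, List.find?, b1, b2, b3, b4, b5, b6, b7, b8, b9,
      h1, h2, h3, h4, h5, h6, h7, h8, h9]
    cases PySem.Chars.isIn q ['t', 'h', 'i', 'e', 'r', 'r', 'y', ' ', 's', 'c', 'h', 'e', 'l', 'l', 'e', 'n', 'b', 'a', 'c', 'h'] <;> cases PySem.Chars.isIn q ['d', 'e', 'v', 'e', 'n'] <;>
      cases PySem.Chars.isIn q ['n', 'e', 'e', 'v', 'a', 's', 'h', ' ', 'r', 'a', 'm', 'd', 'i', 'a', 'l'] <;> simp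

-- ===== VERDICT (by name: the statement is the Claim_ definition above) =====
theorem resolve_handle_py_spec : Claim_equal_resolve_handle_py := by
  intro query _
  unfold Spec_resolve_handle_py resolve_handle_py resolve_handle_py_alt
  have hn : pvNormB query = pvNormA query := rfl
  rw [hn]
  exact pv_core (pvNormA query)
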